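-- pv_equiv track=rewrite | github.com/RatneshChhimwal/Django-Python-Data-Projects | PYTHON DEVELOPMENT/PYTHON PRACTICE/Interview_question1.py | solution
-- ===== SOURCE A (Python) =====
-- def solution(string):
--     alnum_list = []        # Step 1: Initialize an empty list for alphanumeric characters
--     special_dict = {}      # Step 2: Initialize a dictionary for special characters and their indices
--
--     # Step 3: Loop through the string, separating alphanumeric and special characters
--     for i, e in enumerate(string):
--         if e.isalnum():    # If the character is alphanumeric
--             alnum_list.append(e)  # Add it to the alnum_list
--         else:
--             special_dict[i] = e   # Otherwise, store the special character's index and value in the dictionary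
--
--     # Step 4: Reverse the alphanumeric list
--     alnum_list.reverse()
--
--     # Step 5: Insert special characters back at their original indices
--     for idx, char in special_dict.items():
--         alnum_list.insert(idx, char)  # Insert special characters at their original indices
--
--     # Step 6: Join the list back into a string and return the result
--     return ''.join(alnum_list)
-- ===== SOURCE B (Python) =====
-- def solution(string):
--     # Single pass: walk the string, emitting alphanumeric characters from a
--     # reversed pool and keeping every other character where it stands.
--     pool = iter([c for c in string if c.isalnum()][::-1])
--     return ''.join(next(pool) if c.isalnum() else c for c in string)
-- ===== Notes on version B (the rewrite author's own statement) =====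
-- stated objective: simpler
-- what changed: Replaces A's three-phase construction (collect alnum list, reverse it, then list.insert each special character back at its stored dict index) by a single pass over the string that emits successive characters of the reversed alphanumeric pool at alphanumeric positions and the original character elsewhere.
import Mathlib
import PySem

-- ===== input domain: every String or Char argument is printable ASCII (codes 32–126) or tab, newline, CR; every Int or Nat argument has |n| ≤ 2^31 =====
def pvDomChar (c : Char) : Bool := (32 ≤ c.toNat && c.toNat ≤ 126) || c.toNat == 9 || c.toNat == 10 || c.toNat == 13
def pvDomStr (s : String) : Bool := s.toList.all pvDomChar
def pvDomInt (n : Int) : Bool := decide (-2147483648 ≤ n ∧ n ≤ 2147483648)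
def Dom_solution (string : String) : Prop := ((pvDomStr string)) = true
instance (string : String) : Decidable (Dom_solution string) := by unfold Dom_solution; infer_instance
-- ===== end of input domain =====

-- B builds the answer in one pass from a reversed pool of the alphanumeric characters
-- instead of A's re-insertion of each special character at its stored index (objective: simpler).

-- ===== PORT A =====
def solution (string : String) : String :=
  -- Steps 1-3: one loop separating alphanumeric chars (list) from specials (index-keyed dict)
  let st := (PySem.List.enumerate string.toList 0).foldl
    (fun (st : List Char × PySem.Dict Int Char) ie =>
      if PySem.Chars.isalnum ie.2 then (st.1 ++ [ie.2], st.2)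
      else (st.1, st.2.insert ie.1 ie.2))
    (([] : List Char), (PySem.Dict.empty : PySem.Dict Int Char))
  -- Step 4: reverse the alphanumeric list
  let alnum := st.1.reverse
  -- Step 5: insert each special character back at its stored index
  let final := st.2.items.foldl (fun l p => PySem.List.insert l p.1 p.2) alnum
  -- Step 6: join
  String.ofList final

-- ===== PORT B =====
-- the generator expression: emit the next pool element at alphanumeric positions,
-- the original character elsewhere ('next' on an exhausted pool is unreachable:
-- the pool holds exactly one element per alphanumeric position)
def solutionWalk : List Char → List Char → List Char
  | [], _ => []
  | c :: cs, pool =>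
    if PySem.Chars.isalnum c then
      match pool with
      | p :: ps => p :: solutionWalk cs ps
      | [] => []
    else c :: solutionWalk cs pool

def solution_alt (string : String) : String :=
  let pool := (string.toList.filter (fun c => PySem.Chars.isalnum c)).reverse
  String.ofList (solutionWalk string.toList pool)

-- ===== PRECONDITION & SPEC =====
def Spec_solution (string : String) (out : String) : Prop := out = solution_alt string
instance (string : String) (out : String) : Decidable (Spec_solution string out) := by unfold Spec_solution; infer_instance

-- ===== CLAIM (what is proved, stated in full; the proofs are below) =====
def Claim_equal_solution : Prop := ∀ (string : String), Dom_solution string → Spec_solution string (solution string)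

-- ===== LEMMAS AND PROOFS =====

-- the (index, char) pairs of the non-alphanumeric characters, indices starting at k
def specIdx : List Char → Int → List (Int × Char)
  | [], _ => []
  | c :: cs, k =>
    if PySem.Chars.isalnum c then specIdx cs (k + 1)
    else (k, c) :: specIdx cs (k + 1)

lemma specIdx_fst_ge : ∀ (cs : List Char) (k : Int) (p : Int × Char), p ∈ specIdx cs k → k ≤ p.1 := by
  intro cs
  induction cs with
  | nil => intro k p h; simp [specIdx] at h
  | cons c cs ih =>
    intro k p h
    simp only [specIdx] at h
    split at h
    · have := ih (k + 1) p h; omega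
    · rcases List.mem_cons.mp h with h | h
      · subst h; simp
      · have := ih (k + 1) p h; omega

lemma specIdx_fst_nodup : ∀ (cs : List Char) (k : Int), ((specIdx cs k).map Prod.fst).Nodup := by
  intro cs
  induction cs with
  | nil => intro k; simp [specIdx]
  | cons c cs ih =>
    intro k
    simp only [specIdx]
    split
    · exact ih (k + 1)
    · simp only [List.map_cons, List.nodup_cons]
      refine ⟨?_, ih (k + 1)⟩
      intro hmem
      rcases List.mem_map.mp hmem with ⟨p, hp, hfst⟩
      have := specIdx_fst_ge cs (k + 1) p hp
      omega

-- the first loop of A computes (acc ++ alnums, inserts of specIdx into d)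
lemma loopA_spec : ∀ (cs : List Char) (k : Int) (acc : List Char) (d : PySem.Dict Int Char),
    (PySem.List.enumerate cs k).foldl
      (fun (st : List Char × PySem.Dict Int Char) ie =>
        if PySem.Chars.isalnum ie.2 then (st.1 ++ [ie.2], st.2)
        else (st.1, st.2.insert ie.1 ie.2)) (acc, d)
    = (acc ++ cs.filter (fun c => PySem.Chars.isalnum c),
       (specIdx cs k).foldl (fun d p => d.insert p.1 p.2) d) := by
  intro cs
  induction cs with
  | nil => intro k acc d; simp [PySem.List.enumerate_nil, specIdx]
  | cons c cs ih =>
    intro k acc d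
    rw [PySem.List.enumerate_cons]
    simp only [List.foldl_cons, specIdx, List.filter_cons]
    by_cases h : PySem.Chars.isalnum c
    · simp only [h, if_pos, ih (k + 1) (acc ++ [c]) d]
      simp
    · simp only [h, if_neg, Bool.false_eq_true, not_false_iff]
      rw [ih (k + 1) acc (d.insert k c)]
      simp

-- the dict built by the loop lists exactly specIdx cs k, in order
lemma dict_items_spec (cs : List Char) (k : Int) :
    ((specIdx cs k).foldl (fun (d : PySem.Dict Int Char) p => d.insert p.1 p.2)
      PySem.Dict.empty).items = specIdx cs k := by
  have h := PySem.Dict.items_foldl_insert_fresh (l := specIdx cs k)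
    (k := Prod.fst) (v := Prod.snd) (d := PySem.Dict.empty)
    (by intro a _; simp [PySem.Dict.contains_empty]) (specIdx_fst_nodup cs k)
  simpa using h

-- A's insertion loop over the specials rebuilds B's single-pass walk
lemma insAll_spec : ∀ (cs done pool : List Char),
    pool.length = (cs.filter (fun c => PySem.Chars.isalnum c)).length →
    (specIdx cs (done.length : Int)).foldl
      (fun l (p : Int × Char) => PySem.List.insert l p.1 p.2) (done ++ pool)
    = done ++ solutionWalk cs pool := by
  intro cs
  induction cs with
  | nil =>
    intro done pool hlen
    simp only [List.filter_nil, List.length_nil, List.length_eq_zero_iff] at hlen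
    subst hlen
    simp [specIdx, solutionWalk]
  | cons c cs ih =>
    intro done pool hlen
    simp only [specIdx, solutionWalk, List.filter_cons] at *
    by_cases h : PySem.Chars.isalnum c
    · simp only [h, if_pos] at hlen ⊢
      rcases pool with _ | ⟨p, ps⟩
      · simp at hlen
      · have hlen' : ps.length = (cs.filter (fun c => PySem.Chars.isalnum c)).length := by
          simpa using hlen
        have := ih (done ++ [p]) ps hlen'
        simp only [List.length_append, List.length_cons, List.length_nil] at this
        have hcast : ((done.length : Int) + 1) = ((done.length + 1 : Nat) : Int) := by push_cast; ring
        rw [hcast]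
        calc (specIdx cs ((done.length + 1 : Nat) : Int)).foldl
              (fun l (p : Int × Char) => PySem.List.insert l p.1 p.2) (done ++ p :: ps)
            = (specIdx cs ((done.length + 1 : Nat) : Int)).foldl
              (fun l (p : Int × Char) => PySem.List.insert l p.1 p.2) ((done ++ [p]) ++ ps) := by
              simp
          _ = (done ++ [p]) ++ solutionWalk cs ps := this
          _ = done ++ p :: solutionWalk cs ps := by simp
    · simp only [h, Bool.false_eq_true, if_neg, not_false_iff] at hlen ⊢
      simp only [List.foldl_cons]
      have hins : PySem.List.insert (done ++ pool) ((done.length : Nat) : Int) c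
          = done ++ c :: pool := by
        rw [PySem.List.insert_natCast (done ++ pool) done.length c (by simp)]
        rw [List.take_left, List.drop_left]
      rw [hins]
      have hcast : ((done.length : Int) + 1) = (((done ++ [c]).length : Nat) : Int) := by
        simp
      rw [hcast]
      have := ih (done ++ [c]) pool hlen
      calc (specIdx cs (((done ++ [c]).length : Nat) : Int)).foldl
            (fun l (p : Int × Char) => PySem.List.insert l p.1 p.2) (done ++ c :: pool)
          = (specIdx cs (((done ++ [c]).length : Nat) : Int)).foldl
            (fun l (p : Int × Char) => PySem.List.insert l p.1 p.2) ((done ++ [c]) ++ pool) := by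
            simp
        _ = (done ++ [c]) ++ solutionWalk cs pool := this
        _ = done ++ c :: solutionWalk cs pool := by simp

-- ===== VERDICT (by name: the statement is the Claim_ definition above) =====
theorem solution_spec : Claim_equal_solution := by
  intro string _
  unfold Spec_solution solution solution_alt
  simp only
  rw [loopA_spec string.toList 0 [] PySem.Dict.empty]
  simp only [List.nil_append]
  rw [dict_items_spec string.toList 0]
  have h := insAll_spec string.toList []
    ((string.toList.filter (fun c => PySem.Chars.isalnum c)).reverse) (by simp)
  simp only [List.nil_append, List.length_nil, Nat.cast_zero] at h
  rw [h]
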